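-- pv_equiv track=rewrite | github.com/MartijnNaaijer/hebrew_spelling_variation | preprocess_data/src/parse_matres_dss.py | select_pattern
-- ===== SOURCE A (Python) =====
-- def select_pattern(pattern_counts):
--     pattern = ''
--     if len(pattern_counts) == 1:
--         pattern = list(pattern_counts.keys())[0][2]
--
--     elif len(pattern_counts) > 1:
--         counts = list(pattern_counts.values())
--         if counts.count(max(counts)) == 1:
--             for k, v in pattern_counts.items():
--                 if v == max(counts):
--                     pattern = k[2]
--         else:
--             all_patterns = [k[2] for k in pattern_counts.keys()]
--             pattern = ''
--             for pat in all_patterns: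
--                 if pat.count('M') > pattern.count('M'):
--                     pattern = pat
--     return pattern
-- ===== SOURCE B (Python) =====
-- def select_pattern(pattern_counts):
--     # Single pass: track (max value, its multiplicity, pattern of first max entry)
--     # and the best-by-'M'-count pattern for the tie-break, then pick at the end.
--     state = None
--     best = ''
--     for k, v in pattern_counts.items():
--         p = k[2]
--         if state is None or v > state[0]:
--             state = (v, 1, p)
--         elif v == state[0]:
--             state = (state[0], state[1] + 1, state[2])
--         if p.count('M') > best.count('M'):
--             best = p
--     if state is None:
--         return ''
--     m, cnt, pat = state
--     return pat if cnt == 1 else best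
-- ===== Notes on version B (the rewrite author's own statement) =====
-- stated objective: alternative
-- what changed: B replaces A's staged passes (branch on length, max(counts) recomputed inside the selection loop, count of the max, and two separate selection loops) by ONE pass over the dict items with an accumulator holding (max value, its multiplicity, pattern of the first max entry) plus the running best-by-'M'-count pattern, then picks the answer from the accumulator at the end.
import Mathlib
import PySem

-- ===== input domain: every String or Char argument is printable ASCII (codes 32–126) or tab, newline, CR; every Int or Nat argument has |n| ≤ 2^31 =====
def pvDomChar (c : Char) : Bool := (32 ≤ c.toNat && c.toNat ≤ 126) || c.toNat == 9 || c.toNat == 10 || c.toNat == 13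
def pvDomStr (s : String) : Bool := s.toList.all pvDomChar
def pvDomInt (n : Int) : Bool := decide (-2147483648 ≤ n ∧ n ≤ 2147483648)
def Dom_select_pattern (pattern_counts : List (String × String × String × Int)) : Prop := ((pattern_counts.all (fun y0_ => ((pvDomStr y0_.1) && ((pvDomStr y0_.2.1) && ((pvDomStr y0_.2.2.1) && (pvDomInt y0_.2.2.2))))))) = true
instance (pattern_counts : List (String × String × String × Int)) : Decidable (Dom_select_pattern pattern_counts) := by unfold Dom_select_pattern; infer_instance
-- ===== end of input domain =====

-- B replaces A's staged passes (max of all values, count of max, two selection loops)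
-- by ONE pass with an accumulator that tracks the max, its multiplicity and both candidate patterns.

-- ===== PORT A =====
-- pattern_counts is a dict keyed by (s1, s2, s3) triples with Int values, ported as an
-- association list in insertion order; keys(), values(), items() iterate that list.
def select_pattern (pattern_counts : List (String × String × String × Int)) : String :=
  let pattern := ""
  if pattern_counts.length = 1 then
    -- list(pattern_counts.keys())[0][2]; index 0 is in range since the length is 1
    ((PySem.List.pyGet? (pattern_counts.map (fun e => (e.1, e.2.1, e.2.2.1))) 0).map
      (fun k => k.2.2)).getD pattern
  else if pattern_counts.length > 1 then
    let counts := pattern_counts.map (fun e => e.2.2.2)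
    -- max(counts); counts is nonempty here, so max? is some
    let m : Int := (PySem.List.max? counts (fun x => x)).getD 0
    if counts.count m = 1 then
      pattern_counts.foldl (fun pattern e => if e.2.2.2 = m then e.2.2.1 else pattern) pattern
    else
      let all_patterns := (pattern_counts.map (fun e => (e.1, e.2.1, e.2.2.1))).map (fun k => k.2.2)
      all_patterns.foldl
        (fun pattern pat =>
          if PySem.Str.count pat "M" > PySem.Str.count pattern "M" then pat else pattern) ""
  else
    pattern

-- ===== PORT B =====
-- the loop body of Source B: updates (state, best) for one dict item
def pvStepB (acc : Option (Int × Int × String) × String) (e : String × String × String × Int) :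
    Option (Int × Int × String) × String :=
  let p := e.2.2.1
  let v := e.2.2.2
  let state :=
    match acc.1 with
    | none => some (v, (1 : Int), p)
    | some (m, c, q) =>
      if v > m then some (v, (1 : Int), p)
      else if v = m then some (m, c + 1, q)
      else some (m, c, q)
  let best := if PySem.Str.count p "M" > PySem.Str.count acc.2 "M" then p else acc.2
  (state, best)

def select_pattern_alt (pattern_counts : List (String × String × String × Int)) : String :=
  let r := pattern_counts.foldl pvStepB (none, "")
  match r.1 with
  | none => ""
  | some (_, cnt, pat) => if cnt = 1 then pat else r.2

-- ===== PRECONDITION & SPEC =====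
-- Pre_ excludes association lists with duplicate key triples: those do not represent any
-- Python dict (dict construction collapses them), so A's behaviour is not defined on them.
def Pre_select_pattern (pattern_counts : List (String × String × String × Int)) : Prop :=
  (pattern_counts.map (fun e => (e.1, e.2.1, e.2.2.1))).Nodup
instance (pattern_counts : List (String × String × String × Int)) : Decidable (Pre_select_pattern pattern_counts) := by unfold Pre_select_pattern; infer_instance

def pvWitness_select_pattern : (List (String × String × String × Int)) :=
  [("a", "b", "cM", 2), ("d", "e", "f", 1)]

def Spec_select_pattern (pattern_counts : List (String × String × String × Int)) (out : String) : Prop := out = select_pattern_alt pattern_counts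
instance (pattern_counts : List (String × String × String × Int)) (out : String) : Decidable (Spec_select_pattern pattern_counts out) := by unfold Spec_select_pattern; infer_instance

-- ===== CLAIM (what is proved, stated in full; the proofs are below) =====
def Claim_equal_select_pattern : Prop := ∀ (pattern_counts : List (String × String × String × Int)), Dom_select_pattern pattern_counts → Pre_select_pattern pattern_counts → Spec_select_pattern pattern_counts (select_pattern pattern_counts)

-- ===== LEMMAS AND PROOFS =====

-- the two components of B's loop body, separated (proof helpers)
def pvStepSt (st : Option (Int × Int × String)) (e : String × String × String × Int) :
    Option (Int × Int × String) :=
  match st with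
  | none => some (e.2.2.2, (1 : Int), e.2.2.1)
  | some (m, c, q) =>
    if e.2.2.2 > m then some (e.2.2.2, (1 : Int), e.2.2.1)
    else if e.2.2.2 = m then some (m, c + 1, q)
    else some (m, c, q)

def pvStepBest (b : String) (e : String × String × String × Int) : String :=
  if PySem.Str.count e.2.2.1 "M" > PySem.Str.count b "M" then e.2.2.1 else b

-- B's combined fold splits into the two independent folds.
lemma pv_split (l : List (String × String × String × Int)) :
    ∀ st b, l.foldl pvStepB (st, b) = (l.foldl pvStepSt st, l.foldl pvStepBest b) := by
  induction l with
  | nil => intro st b; rfl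
  | cons e t ih =>
    intro st b
    rw [List.foldl_cons, List.foldl_cons, List.foldl_cons]
    have : pvStepB (st, b) e = (pvStepSt st e, pvStepBest b e) := by
      cases st with
      | none => rfl
      | some s => obtain ⟨m, c, q⟩ := s; rfl
    rw [this, ih]

-- Characterisation of the state fold from a 'some' accumulator.
lemma pv_st_fold (t : List (String × String × String × Int)) :
    ∀ (m c : Int) (p : String),
      t.foldl pvStepSt (some (m, c, p)) =
        some ((t.map (fun e => e.2.2.2)).foldl max m,
          (if (t.map (fun e => e.2.2.2)).foldl max m = m then c else 0) +
            ((t.map (fun e => e.2.2.2)).count ((t.map (fun e => e.2.2.2)).foldl max m) : Int),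
          if (t.map (fun e => e.2.2.2)).foldl max m = m then p
          else ((t.find? (fun e => e.2.2.2 == (t.map (fun e => e.2.2.2)).foldl max m)).map
            (fun e => e.2.2.1)).getD "") := by
  induction t with
  | nil => intro m c p; simp [List.count_nil]
  | cons e t ih =>
    intro m c p
    rw [List.foldl_cons]
    by_cases hgt : e.2.2.2 > m
    · have hstep : pvStepSt (some (m, c, p)) e = some (e.2.2.2, 1, e.2.2.1) := by
        simp [pvStepSt, hgt]
      rw [hstep, ih]
      have hmax : max m e.2.2.2 = e.2.2.2 := max_eq_right (le_of_lt hgt)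
      set M := (t.map (fun e => e.2.2.2)).foldl max e.2.2.2 with hM
      have hMge : e.2.2.2 ≤ M := by
        rw [hM]; exact (PySem.List.le_foldl_max _ _).1
      have hMne : M ≠ m := by omega
      simp only [List.map_cons, List.foldl_cons, hmax, ← hM]
      rw [if_neg hMne, if_neg hMne]
      simp only [Option.some.injEq, Prod.mk.injEq]
      refine ⟨by trivial, ?_, ?_⟩
      · -- counts agree
        rw [List.count_cons]
        simp only [beq_iff_eq]
        split_ifs <;> push_cast <;> omega
      · -- patterns agree
        by_cases hMv : M = e.2.2.2
        · have hf : List.find? (fun x => x.2.2.2 == M) (e :: t) = some e :=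
            List.find?_cons_of_pos (show (e.2.2.2 == M) = true by simp only [beq_iff_eq]; omega)
          rw [if_pos hMv, hf]
          rfl
        · rw [if_neg hMv, List.find?_cons_of_neg (by simp only [beq_iff_eq]; omega)]
    · have hmax : max m e.2.2.2 = m := max_eq_left (by omega)
      set M := (t.map (fun e => e.2.2.2)).foldl max m with hM
      have hMge : m ≤ M := by
        rw [hM]; exact (PySem.List.le_foldl_max _ _).1
      simp only [List.map_cons, List.foldl_cons, hmax, ← hM]
      by_cases heq : e.2.2.2 = m
      · have hstep : pvStepSt (some (m, c, p)) e = some (m, c + 1, p) := by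
          simp [pvStepSt, heq]
        rw [hstep, ih, ← hM]
        simp only [Option.some.injEq, Prod.mk.injEq]
        refine ⟨by trivial, ?_, ?_⟩
        · rw [List.count_cons]
          simp only [beq_iff_eq]
          split_ifs <;> push_cast <;> omega
        · by_cases hMm : M = m
          · rw [if_pos hMm, if_pos hMm]
          · rw [if_neg hMm, if_neg hMm, List.find?_cons_of_neg (by simp only [beq_iff_eq]; omega)]
      · have hstep : pvStepSt (some (m, c, p)) e = some (m, c, p) := by
          simp [pvStepSt, hgt, heq]
        rw [hstep, ih, ← hM]
        simp only [Option.some.injEq, Prod.mk.injEq]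
        refine ⟨by trivial, ?_, ?_⟩
        · rw [List.count_cons]
          simp only [beq_iff_eq]
          split_ifs <;> push_cast <;> omega
        · by_cases hMm : M = m
          · rw [if_pos hMm, if_pos hMm]
          · rw [if_neg hMm, if_neg hMm, List.find?_cons_of_neg (by simp only [beq_iff_eq]; omega)]

-- When no element carries the max value, A's selection fold keeps its accumulator.
lemma pv_uniq_zero (m : Int) (l : List (String × String × String × Int)) :
    ∀ acc : String, (l.map (fun e => e.2.2.2)).count m = 0 →
      l.foldl (fun pattern e => if e.2.2.2 = m then e.2.2.1 else pattern) acc = acc := by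
  induction l with
  | nil => intro acc _; rfl
  | cons e t ih =>
    intro acc h
    rw [List.count_eq_zero] at h
    simp only [List.map_cons, List.mem_cons, not_or] at h
    rw [List.foldl_cons, if_neg (show ¬ e.2.2.2 = m from fun he => h.1 he.symm)]
    exact ih acc (by rw [List.count_eq_zero]; exact h.2)

-- With a unique max value, A's last-match fold is the first-match find?.
lemma pv_uniq (m : Int) (l : List (String × String × String × Int)) :
    ∀ acc : String, (l.map (fun e => e.2.2.2)).count m = 1 →
      l.foldl (fun pattern e => if e.2.2.2 = m then e.2.2.1 else pattern) acc
      = ((l.find? (fun e => e.2.2.2 == m)).map (fun e => e.2.2.1)).getD "" := by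
  induction l with
  | nil => intro acc h; simp at h
  | cons e t ih =>
    intro acc h
    simp only [List.map_cons, List.count_cons] at h
    by_cases he : e.2.2.2 = m
    · have ht : (t.map (fun e => e.2.2.2)).count m = 0 := by
        simp [he] at h; omega
      rw [List.foldl_cons, if_pos he, List.find?_cons_of_pos (by simp [he]),
        Option.map_some, Option.getD_some]
      exact pv_uniq_zero m t e.2.2.1 ht
    · have ht : (t.map (fun e => e.2.2.2)).count m = 1 := by
        have he' : ¬ (e.2.2.2 == m) = true := by simp [he]
        rw [if_neg he'] at h; omega
      rw [List.foldl_cons, if_neg he, List.find?_cons_of_neg (by simp [he])]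
      exact ih acc ht

-- ===== VERDICT (by name: the statement is the Claim_ definition above) =====
theorem select_pattern_spec : Claim_equal_select_pattern := by
  intro pc _hdom _hpre
  unfold Spec_select_pattern
  match pc with
  | [] => rfl
  | e :: t =>
    -- B's result, with the combined fold split and the state fold characterised
    have hB : select_pattern_alt (e :: t) =
        (if (if (t.map (fun x => x.2.2.2)).foldl max e.2.2.2 = e.2.2.2 then (1 : Int) else 0) +
            ((t.map (fun x => x.2.2.2)).count
              ((t.map (fun x => x.2.2.2)).foldl max e.2.2.2) : Int) = 1
        then (if (t.map (fun x => x.2.2.2)).foldl max e.2.2.2 = e.2.2.2 then e.2.2.1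
          else ((t.find? (fun x =>
            x.2.2.2 == (t.map (fun x => x.2.2.2)).foldl max e.2.2.2)).map
            (fun x => x.2.2.1)).getD "")
        else t.foldl pvStepBest (pvStepBest "" e)) := by
      simp only [select_pattern_alt, List.foldl_cons]
      rw [show pvStepB (none, "") e = (some (e.2.2.2, 1, e.2.2.1), pvStepBest "" e) from rfl,
        pv_split, pv_st_fold]
    rw [hB]
    -- the running max over the whole value list is Python's max(counts)
    have hMfold : (t.map (fun x => x.2.2.2)).foldl max e.2.2.2
        = (PySem.List.max? ((e :: t).map (fun x => x.2.2.2)) (fun x => x)).getD 0 := by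
      rw [List.map_cons, PySem.List.max?_id_cons, Option.getD_some]
    set m : Int := (PySem.List.max? ((e :: t).map (fun x => x.2.2.2)) (fun x => x)).getD 0
      with hm
    rw [hMfold]
    have hme : e.2.2.2 ≤ m := by
      rw [← hMfold]; exact (PySem.List.le_foldl_max _ _).1
    -- the total count of m over the whole list
    have hcount : (if m = e.2.2.2 then (1 : Int) else 0) +
        ((t.map (fun x => x.2.2.2)).count m : Int)
        = (((e :: t).map (fun x => x.2.2.2)).count m : Int) := by
      rw [List.map_cons, List.count_cons]
      simp only [beq_iff_eq]
      split_ifs <;> push_cast <;> omega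
    -- the selected first-max pattern over the whole list
    have hfind : (if m = e.2.2.2 then e.2.2.1
        else ((t.find? (fun x => x.2.2.2 == m)).map (fun x => x.2.2.1)).getD "")
        = (((e :: t).find? (fun x => x.2.2.2 == m)).map (fun x => x.2.2.1)).getD "" := by
      by_cases hv : m = e.2.2.2
      · have hf : List.find? (fun x => x.2.2.2 == m) (e :: t) = some e :=
          List.find?_cons_of_pos (show (e.2.2.2 == m) = true by simp only [beq_iff_eq]; omega)
        rw [if_pos hv, hf]
        rfl
      · rw [if_neg hv, List.find?_cons_of_neg (by simp only [beq_iff_eq]; omega)]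
    cases t with
    | nil =>
      -- singleton: A takes the len==1 branch, B's count is 1
      have hm1 : m = e.2.2.2 := by
        rw [hm, List.map_cons, List.map_nil, PySem.List.max?_id_cons]; rfl
      simp only [List.map_nil, List.count_nil, List.foldl_nil]
      rw [if_pos hm1, if_pos (by norm_num), if_pos hm1]
      simp [select_pattern, PySem.List.pyGet?, PySem.List.pyIdx?]
    | cons e2 t2 =>
      -- length >= 2: A takes the elif branch
      have hA : select_pattern (e :: e2 :: t2) =
          (if ((e :: e2 :: t2).map (fun x => x.2.2.2)).count m = 1 then
            (e :: e2 :: t2).foldl (fun pattern x => if x.2.2.2 = m then x.2.2.1 else pattern) ""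
          else
            (((e :: e2 :: t2).map (fun x => (x.1, x.2.1, x.2.2.1))).map (fun k => k.2.2)).foldl
              (fun pattern pat =>
                if PySem.Str.count pat "M" > PySem.Str.count pattern "M" then pat else pattern)
              "") := by
        simp only [select_pattern, List.length_cons]
        rw [if_neg (by omega), if_pos (by omega), ← hm]
      rw [hA]
      by_cases hc : ((e :: e2 :: t2).map (fun x => x.2.2.2)).count m = 1
      · -- unique max: both pick the entry holding m
        rw [if_pos hc]
        have hcInt : (if m = e.2.2.2 then (1 : Int) else 0) +
            (((e2 :: t2).map (fun x => x.2.2.2)).count m : Int) = 1 := by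
          rw [hcount, hc]; rfl
        rw [if_pos hcInt, hfind]
        exact pv_uniq m _ "" hc
      · -- tied max: both run the same strict-replace fold over the patterns
        rw [if_neg hc]
        have hcInt : ¬ ((if m = e.2.2.2 then (1 : Int) else 0) +
            (((e2 :: t2).map (fun x => x.2.2.2)).count m : Int) = 1) := by
          rw [hcount]; intro h
          exact hc (by exact_mod_cast h)
        rw [if_neg hcInt]
        -- B's best fold over entries = A's fold over the mapped pattern list
        rw [List.map_map, List.map_cons, List.foldl_cons, List.foldl_map]
        rfl
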